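-- pv_equiv track=rewrite | github.com/46112/Coding-Chanllenges | Programmers/LV2_마법의 엘리베이터.py | solution
-- ===== SOURCE A (Python) =====
-- def solution(storey):
--     used_magic_stones = 0
--     while storey > 0:
--         n = storey % 10
--         if n > 5:
--             used_magic_stones += (10 - n)
--             storey += 10
--         elif n < 5:
--             used_magic_stones += n
--         else:# 현재 자릿수가 5이고, 다음 자리가 5이상이면, 10을 더하고 5를 빼는 편이 좋음
--             if (storey // 10) % 10 >= 5:
--                 storey += 10
--             used_magic_stones += 5
--         storey //= 10
--
--     return used_magic_stones
-- ===== SOURCE B (Python) =====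
-- def solution(storey):
--     # Recursive digit DP: at each digit either pay d stones and round down,
--     # or pay (10 - d) stones and carry up; take the minimum of both branches.
--     if storey <= 0:
--         return 0
--     if storey == 1:  # base case (a lone carry past the top digit costs 1)
--         return 1
--     d = storey % 10
--     return min(d + solution(storey // 10), (10 - d) + solution(storey // 10 + 1))
-- ===== Notes on version B (the rewrite author's own statement) =====
-- stated objective: alternative
-- what changed: Replaced A's iterative greedy digit loop (with an explicit lookahead at the digit-5 tie) by a recursion that tries both 'round down' and 'carry up' at every digit and takes the minimum.
import Mathlib
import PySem

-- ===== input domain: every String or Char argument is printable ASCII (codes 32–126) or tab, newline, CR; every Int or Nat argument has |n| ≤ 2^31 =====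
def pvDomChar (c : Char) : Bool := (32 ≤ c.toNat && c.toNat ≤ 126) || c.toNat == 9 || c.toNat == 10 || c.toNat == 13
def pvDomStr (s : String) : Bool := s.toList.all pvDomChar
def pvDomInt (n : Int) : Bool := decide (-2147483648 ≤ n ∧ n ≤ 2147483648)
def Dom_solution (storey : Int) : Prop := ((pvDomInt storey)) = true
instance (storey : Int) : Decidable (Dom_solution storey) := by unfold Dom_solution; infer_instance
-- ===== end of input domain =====

-- B replaces A's greedy loop (with its explicit digit-5 lookahead) by a recursion
-- taking the min of the 'round down' and 'carry up' branches at each digit (alternative).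

-- ===== PORT A =====
-- A's while loop over the state (storey, used_magic_stones); each branch ends with storey //= 10.
def solutionLoop (storey used : Int) : Int :=
  if _h : storey > 0 then
    if PySem.Int.mod storey 10 > 5 then
      solutionLoop (PySem.Int.floordiv (storey + 10) 10) (used + (10 - PySem.Int.mod storey 10))
    else if PySem.Int.mod storey 10 < 5 then
      solutionLoop (PySem.Int.floordiv storey 10) (used + PySem.Int.mod storey 10)
    else if PySem.Int.mod (PySem.Int.floordiv storey 10) 10 ≥ 5 then
      solutionLoop (PySem.Int.floordiv (storey + 10) 10) (used + 5)
    else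
      solutionLoop (PySem.Int.floordiv storey 10) (used + 5)
  else used
termination_by storey.toNat
decreasing_by
  all_goals
    have hm : PySem.Int.mod storey 10 = storey % 10 :=
      PySem.Int.mod_eq_emod_of_pos (by omega)
    simp only [hm, PySem.Int.floordiv_eq_ediv_of_pos (by omega : (0:Int) < 10)] at *
    omega

def solution (storey : Int) : Int := solutionLoop storey 0

-- ===== PORT B =====
def solution_alt (storey : Int) : Int :=
  if storey ≤ 0 then 0
  else if storey = 1 then 1
  else
    let d := PySem.Int.mod storey 10
    min (d + solution_alt (PySem.Int.floordiv storey 10))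
        ((10 - d) + solution_alt (PySem.Int.floordiv storey 10 + 1))
termination_by storey.toNat
decreasing_by
  all_goals
    simp only [PySem.Int.floordiv_eq_ediv_of_pos (a := storey) (by omega : (0:Int) < 10)]
    omega

-- ===== PRECONDITION & SPEC =====
def Spec_solution (storey : Int) (out : Int) : Prop := out = solution_alt storey
instance (storey : Int) (out : Int) : Decidable (Spec_solution storey out) := by unfold Spec_solution; infer_instance

-- ===== CLAIM (what is proved, stated in full; the proofs are below) =====
def Claim_equal_solution : Prop := ∀ (storey : Int), Dom_solution storey → Spec_solution storey (solution storey)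

-- ===== LEMMAS AND PROOFS =====

theorem alt_nonpos {s : Int} (h : s ≤ 0) : solution_alt s = 0 := by
  rw [solution_alt]; simp [h]

theorem alt_one : solution_alt 1 = 1 := by
  rw [solution_alt]; norm_num

theorem alt_eq {s : Int} (h : 2 ≤ s) :
    solution_alt s = min (s % 10 + solution_alt (s / 10))
      ((10 - s % 10) + solution_alt (s / 10 + 1)) := by
  rw [solution_alt]
  rw [PySem.Int.floordiv_eq_ediv_of_pos (by omega), PySem.Int.mod_eq_emod_of_pos (by omega)]
  have h1 : ¬ s ≤ 0 := by omega
  have h2 : s ≠ 1 := by omega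
  simp [h1, h2]

-- the four digit-step inequalities for B's recurrence, proved together by strong induction
theorem alt_step (n : Nat) : ∀ s : Int, s.toNat = n → 0 ≤ s →
    (solution_alt (s + 1) ≤ solution_alt s + 1) ∧
    (solution_alt s ≤ solution_alt (s + 1) + 1) ∧
    (5 ≤ s % 10 → solution_alt (s + 1) ≤ solution_alt s) ∧
    (s % 10 < 5 → solution_alt s ≤ solution_alt (s + 1)) := by
  induction n using Nat.strong_induction_on with
  | _ n ih =>
    intro s hn hs
    by_cases h0 : s = 0
    · subst h0; simp [alt_nonpos, alt_one]
    by_cases h1 : s = 1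
    · subst h1
      have h2 : solution_alt 2 = 2 := by
        rw [alt_eq (by omega)]; norm_num [alt_nonpos, alt_one]
      simp [alt_one, h2]
    have hs2 : 2 ≤ s := by omega
    have hq0 : 0 ≤ s / 10 := by omega
    have hqlt : (s / 10).toNat < n := by omega
    have hq1lt : (s / 10 + 1).toNat < n := by omega
    obtain ⟨A1, A2, A3, A4⟩ := ih _ hqlt (s / 10) rfl hq0
    obtain ⟨B1, B2, _, _⟩ := ih _ hq1lt (s / 10 + 1) rfl (by omega)
    have hfs := alt_eq hs2
    by_cases h9 : s % 10 = 9
    · -- s+1 rolls over: digit 0, quotient s/10 + 1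
      have hfs1 : solution_alt (s + 1) =
          min ((s + 1) % 10 + solution_alt ((s + 1) / 10))
            ((10 - (s + 1) % 10) + solution_alt ((s + 1) / 10 + 1)) := alt_eq (by omega)
      have e1 : (s + 1) % 10 = 0 := by omega
      have e2 : (s + 1) / 10 = s / 10 + 1 := by omega
      rw [e1, e2] at hfs1
      refine ⟨?_, ?_, fun _ => ?_, fun hc => ?_⟩ <;> rw [hfs, hfs1] <;> omega
    · -- digit stays in the same block: quotient of s+1 is s/10
      have hfs1 : solution_alt (s + 1) =
          min ((s + 1) % 10 + solution_alt ((s + 1) / 10))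
            ((10 - (s + 1) % 10) + solution_alt ((s + 1) / 10 + 1)) := alt_eq (by omega)
      have e1 : (s + 1) % 10 = s % 10 + 1 := by omega
      have e2 : (s + 1) / 10 = s / 10 := by omega
      rw [e1, e2] at hfs1
      have hd : 0 ≤ s % 10 := by omega
      refine ⟨?_, ?_, fun hc => ?_, fun hc => ?_⟩ <;> rw [hfs, hfs1] <;> omega

theorem alt_step' (s : Int) (hs : 0 ≤ s) :
    (solution_alt (s + 1) ≤ solution_alt s + 1) ∧
    (solution_alt s ≤ solution_alt (s + 1) + 1) ∧
    (5 ≤ s % 10 → solution_alt (s + 1) ≤ solution_alt s) ∧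
    (s % 10 < 5 → solution_alt s ≤ solution_alt (s + 1)) :=
  alt_step s.toNat s rfl hs

-- the greedy loop of A computes `used + solution_alt storey`
theorem loop_eq (n : Nat) : ∀ s used : Int, s.toNat = n →
    solutionLoop s used = used + solution_alt s := by
  induction n using Nat.strong_induction_on with
  | _ n ih =>
    intro s used hn
    by_cases hpos : s > 0
    · have hq0 : 0 ≤ s / 10 := by omega
      obtain ⟨L1, L2, L3, L4⟩ := alt_step' (s / 10) hq0
      rw [solutionLoop]
      simp only [hpos, dif_pos]
      rw [PySem.Int.mod_eq_emod_of_pos (by omega),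
        PySem.Int.floordiv_eq_ediv_of_pos (a := s + 10) (by omega : (0:Int) < 10),
        PySem.Int.floordiv_eq_ediv_of_pos (a := s) (by omega : (0:Int) < 10),
        PySem.Int.mod_eq_emod_of_pos (by omega)]
      have e10 : (s + 10) / 10 = s / 10 + 1 := by omega
      rw [e10]
      have hd0 : 0 ≤ s % 10 := by omega
      have hd9 : s % 10 ≤ 9 := by omega
      by_cases h1 : s = 1
      · subst h1
        norm_num
        rw [ih 0 (by omega) 0 (used + 1) rfl, alt_nonpos (by norm_num), alt_one]
        ring
      · have hs2 : 2 ≤ s := by omega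
        have hfs := alt_eq hs2
        have hqlt : (s / 10).toNat < n := by omega
        have hq1lt : (s / 10 + 1).toNat < n := by omega
        split_ifs with hgt hlt hnext
        · rw [ih _ hq1lt _ _ rfl, hfs]; omega
        · rw [ih _ hqlt _ _ rfl, hfs]; omega
        · rw [ih _ hq1lt _ _ rfl, hfs]
          have := L3 hnext
          omega
        · rw [ih _ hqlt _ _ rfl, hfs]
          have := L4 (by omega)
          omega
    · rw [solutionLoop]
      simp only [hpos]
      rw [alt_nonpos (by omega)]
      simp

-- ===== VERDICT (by name: the statement is the Claim_ definition above) =====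
theorem solution_spec : Claim_equal_solution := by
  intro storey _
  unfold Spec_solution solution
  rw [loop_eq storey.toNat storey 0 rfl]
  simp
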